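-- pv_equiv track=rewrite | github.com/wherby/code | algorithm/basic/arrayDiff/arrayDiff.py | arrDiff2
-- ===== SOURCE A (Python) =====
-- def arrDiff2(ls):
--     n = len (ls)
--     res =[0]*n
--     pre  =[0]*(n+1)
--     for i in range(n):
--         pre[i+1] =pre[i] + ls[i]
--     for i in range(n):
--         res[i] = i*ls[i] - pre[i] + pre[n] - pre[i+1] -ls[i] * (n-i-1)
--     return res
-- ===== SOURCE B (Python) =====
-- def arrDiff2(ls):
--     n = len(ls)
--     res = []
--     for i in range(n):
--         acc = 0
--         for j in range(n):
--             if j < i: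
--                 acc += ls[i] - ls[j]
--             elif j > i:
--                 acc += ls[j] - ls[i]
--         res.append(acc)
--     return res
-- ===== Notes on version B (the rewrite author's own statement) =====
-- stated objective: simpler
-- what changed: Replaced the prefix-sum array and index-arithmetic formula with a direct per-index accumulation: for each i, one inner pass adds ls[i]-ls[j] for j<i and ls[j]-ls[i] for j>i.
import Mathlib
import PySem

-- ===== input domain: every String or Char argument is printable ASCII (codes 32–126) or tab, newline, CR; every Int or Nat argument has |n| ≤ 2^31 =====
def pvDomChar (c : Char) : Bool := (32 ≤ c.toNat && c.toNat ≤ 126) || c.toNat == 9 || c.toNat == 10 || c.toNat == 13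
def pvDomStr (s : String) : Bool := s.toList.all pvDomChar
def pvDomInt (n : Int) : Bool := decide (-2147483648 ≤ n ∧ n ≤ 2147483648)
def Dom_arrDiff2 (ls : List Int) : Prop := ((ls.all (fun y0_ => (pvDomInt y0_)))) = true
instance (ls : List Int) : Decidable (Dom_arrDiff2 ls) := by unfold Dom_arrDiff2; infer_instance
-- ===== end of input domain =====

-- B replaces A's prefix-sum array with a direct per-index nested-loop accumulation (simpler, no auxiliary array; return value only, no mutation observable).

-- ===== PORT A =====
def arrDiff2 (ls : List Int) : List Int :=
  let n : Int := PySem.List.len ls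
  let res : List Int := List.replicate n.toNat 0
  let pre : List Int := List.replicate (n + 1).toNat 0
  let pre := (PySem.List.pyRange 0 n 1).foldl
    (fun p i => PySem.List.pySetD p (i + 1)
      (PySem.List.pyGetD p i 0 + PySem.List.pyGetD ls i 0)) pre
  let res := (PySem.List.pyRange 0 n 1).foldl
    (fun r i => PySem.List.pySetD r i
      (i * PySem.List.pyGetD ls i 0 - PySem.List.pyGetD pre i 0
        + PySem.List.pyGetD pre n 0 - PySem.List.pyGetD pre (i + 1) 0
        - PySem.List.pyGetD ls i 0 * (n - i - 1))) res
  res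

-- ===== PORT B =====
def arrDiff2_alt (ls : List Int) : List Int :=
  let n : Int := PySem.List.len ls
  (PySem.List.pyRange 0 n 1).foldl (fun res i =>
    let acc := (PySem.List.pyRange 0 n 1).foldl (fun acc j =>
      if j < i then acc + (PySem.List.pyGetD ls i 0 - PySem.List.pyGetD ls j 0)
      else if i < j then acc + (PySem.List.pyGetD ls j 0 - PySem.List.pyGetD ls i 0)
      else acc) 0
    res ++ [acc]) []

-- ===== PRECONDITION & SPEC =====
def Spec_arrDiff2 (ls : List Int) (out : List Int) : Prop := out = arrDiff2_alt ls
instance (ls : List Int) (out : List Int) : Decidable (Spec_arrDiff2 ls out) := by unfold Spec_arrDiff2; infer_instance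

-- ===== CLAIM (what is proved, stated in full; the proofs are below) =====
def Claim_equal_arrDiff2 : Prop := ∀ (ls : List Int), Dom_arrDiff2 ls → Spec_arrDiff2 ls (arrDiff2 ls)

-- ===== LEMMAS AND PROOFS =====

-- sum of the first k elements (pre[k] in A)
def pvT (ls : List Int) (k : Nat) : Int := (ls.take k).sum

-- the common per-index value both programs compute
def pvF (ls : List Int) (k : Nat) : Int :=
  (k : Int) * ls.getD k 0 - pvT ls k + pvT ls ls.length - pvT ls (k + 1)
    - ls.getD k 0 * ((ls.length : Int) - k - 1)

theorem pvT_succ (ls : List Int) (m : Nat) (hm : m < ls.length) :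
    pvT ls (m + 1) = pvT ls m + ls.getD m 0 := by
  unfold pvT
  rw [List.take_add_one, List.sum_append, List.getElem?_eq_getElem hm]
  simp [List.getD_eq_getElem?_getD, List.getElem?_eq_getElem hm]

theorem map_getD_range (ls : List Int) : ∀ (k : Nat), k ≤ ls.length →
    (List.range k).map (fun j => ls.getD j 0) = ls.take k := by
  intro k
  induction k with
  | zero => simp
  | succ m ih =>
    intro hk
    have hm : m < ls.length := by omega
    rw [List.range_succ, List.map_append, ih (by omega), List.take_add_one]
    simp [List.getD, hm]

theorem sum_map_sub_const {α : Type} (x : α → Int) (c : Int) :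
    ∀ (l : List α), (l.map (fun j => x j - c)).sum = (l.map x).sum - l.length * c := by
  intro l
  induction l with
  | nil => simp
  | cons a t ih => simp [ih]; ring

theorem sum_map_const_sub {α : Type} (x : α → Int) (c : Int) :
    ∀ (l : List α), (l.map (fun j => c - x j)).sum = l.length * c - (l.map x).sum := by
  intro l
  induction l with
  | nil => simp
  | cons a t ih => simp [ih]; ring

-- A's first loop: the prefix array after processing range(0, m)
theorem pre_loop (ls : List Int) : ∀ (m : Nat), m ≤ ls.length →
    (PySem.List.pyRange 0 (m : Int) 1).foldl
      (fun p i => PySem.List.pySetD p (i + 1)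
        (PySem.List.pyGetD p i 0 + PySem.List.pyGetD ls i 0))
      (List.replicate (ls.length + 1) 0)
    = (List.range (ls.length + 1)).map (fun k => if k ≤ m then pvT ls k else 0) := by
  intro m
  induction m with
  | zero =>
    intro _
    rw [PySem.List.pyRange_one_eq_nil (by omega)]
    simp only [List.foldl_nil]
    apply List.ext_getElem
    · simp
    · intro k h1 h2
      simp only [List.getElem_replicate, List.getElem_map, List.getElem_range]
      rcases Nat.eq_zero_or_pos k with h | h
      · simp [h, pvT]
      · simp [Nat.not_le.mpr h]
  | succ m ih =>
    intro hm
    have hm' : m < ls.length := by omega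
    have hc : ((m + 1 : Nat) : Int) = (m : Int) + 1 := by push_cast; ring
    rw [hc, PySem.List.pyRange_one_succ_right (by positivity), List.foldl_append,
      ih (by omega)]
    simp only [List.foldl_cons, List.foldl_nil]
    have hcast : ((m : Int) + 1) = ((m + 1 : Nat) : Int) := by push_cast; ring
    rw [hcast, PySem.List.pySetD_natCast]
    have hgp : PySem.List.pyGetD
        ((List.range (ls.length + 1)).map (fun k => if k ≤ m then pvT ls k else 0)) (m : Int) 0
        = pvT ls m := by
      rw [PySem.List.pyGetD_natCast]
      rw [List.getD_eq_getElem?_getD, List.getElem?_map,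
        List.getElem?_range (by omega)]
      simp
    have hgl : PySem.List.pyGetD ls (m : Int) 0 = ls.getD m 0 := by
      simp [PySem.List.pyGetD_natCast]
    rw [hgp, hgl]
    apply List.ext_getElem
    · simp
    · intro k h1 h2
      have hk : k < ls.length + 1 := by simpa using h2
      rw [List.getElem_set]
      simp only [List.getElem_map, List.getElem_range]
      by_cases he : m + 1 = k
      · subst he
        simp [pvT_succ ls m hm']
      · simp only [if_neg he]
        by_cases hle : k ≤ m
        · simp [hle, Nat.le_succ_of_le hle]
        · have : ¬ k ≤ m + 1 := by omega
          simp [hle, this]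

-- A's second loop: writing g(i) at index i over range(0, m), generic in g
theorem res_loop (g : Int → Int) (L : Nat) : ∀ (m : Nat), m ≤ L →
    (PySem.List.pyRange 0 (m : Int) 1).foldl
      (fun r i => PySem.List.pySetD r i (g i)) (List.replicate L (0 : Int))
    = (List.range L).map (fun k => if k < m then g k else 0) := by
  intro m
  induction m with
  | zero =>
    intro _
    rw [PySem.List.pyRange_one_eq_nil (by omega)]
    simp only [List.foldl_nil]
    apply List.ext_getElem
    · simp
    · intro k h1 h2
      simp
  | succ m ih =>
    intro hm
    have hc : ((m + 1 : Nat) : Int) = (m : Int) + 1 := by push_cast; ring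
    rw [hc, PySem.List.pyRange_one_succ_right (by positivity), List.foldl_append,
      ih (by omega)]
    simp only [List.foldl_cons, List.foldl_nil]
    rw [PySem.List.pySetD_natCast]
    apply List.ext_getElem
    · simp
    · intro k h1 h2
      have hk : k < L := by simpa using h2
      rw [List.getElem_set]
      simp only [List.getElem_map, List.getElem_range]
      by_cases he : m = k
      · subst he; simp
      · simp only [if_neg he]
        by_cases hlt : k < m
        · simp [hlt, Nat.lt_succ_of_lt hlt]
        · have : ¬ k < m + 1 := by omega
          simp [hlt, this]

theorem arrDiff2_eq_map (ls : List Int) :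
    arrDiff2 ls = (List.range ls.length).map (pvF ls) := by
  unfold arrDiff2
  simp only [PySem.List.len_eq, Int.toNat_natCast]
  have hto : ((ls.length : Int) + 1).toNat = ls.length + 1 := by omega
  rw [hto, pre_loop ls ls.length (le_refl _)]
  set pre := (List.range (ls.length + 1)).map (fun k => if k ≤ ls.length then pvT ls k else 0) with hpre
  rw [res_loop _ ls.length ls.length (le_refl _)]
  apply List.ext_getElem
  · simp
  · intro k h1 h2
    have hk : k < ls.length := by simpa using h1
    simp only [List.getElem_map, List.getElem_range, if_pos hk]
    have hget : ∀ (j : Nat), j ≤ ls.length → PySem.List.pyGetD pre (j : Int) 0 = pvT ls j := by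
      intro j hj
      rw [PySem.List.pyGetD_natCast, hpre]
      rw [List.getD_eq_getElem?_getD, List.getElem?_map, List.getElem?_range (by omega)]
      simp [hj]
    have h1' := hget k (by omega)
    have h2' : PySem.List.pyGetD pre ((k : Int) + 1) 0 = pvT ls (k + 1) := by
      have : ((k : Int) + 1) = ((k + 1 : Nat) : Int) := by push_cast; ring
      rw [this, hget (k + 1) (by omega)]
    have h3' := hget ls.length (le_refl _)
    rw [h1', h2', h3']
    simp [pvF, PySem.List.pyGetD_natCast]

theorem pvInnerSum (ls : List Int) (k : Nat) (hk : k < ls.length) :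
    (PySem.List.pyRange 0 (ls.length : Int) 1).foldl (fun acc j =>
      if j < (k : Int) then acc + (PySem.List.pyGetD ls (k : Int) 0 - PySem.List.pyGetD ls j 0)
      else if (k : Int) < j then acc + (PySem.List.pyGetD ls j 0 - PySem.List.pyGetD ls (k : Int) 0)
      else acc) 0 = pvF ls k := by
  set c := PySem.List.pyGetD ls (k : Int) 0 with hc
  have hcc : c = ls.getD k 0 := by rw [hc, PySem.List.pyGetD_natCast]
  -- turn the branching fold into a pure summation fold
  have hfun : (fun (acc j : Int) =>
      if j < (k : Int) then acc + (c - PySem.List.pyGetD ls j 0)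
      else if (k : Int) < j then acc + (PySem.List.pyGetD ls j 0 - c)
      else acc)
      = (fun acc j => acc + (if j < (k : Int) then c - PySem.List.pyGetD ls j 0
        else if (k : Int) < j then PySem.List.pyGetD ls j 0 - c else 0)) := by
    funext acc j
    split_ifs <;> simp
  rw [hfun, PySem.List.foldl_add]
  rw [PySem.List.pyRange_one_append 0 (k : Int) (ls.length : Int) (by omega) (by omega),
    PySem.List.pyRange_one_cons (a := (k : Int)) (b := (ls.length : Int)) (by omega)]
  simp only [List.map_append, List.map_cons, List.sum_append, List.sum_cons]
  have hlow : ((PySem.List.pyRange 0 (k : Int) 1).map (fun j =>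
      if j < (k : Int) then c - PySem.List.pyGetD ls j 0
      else if (k : Int) < j then PySem.List.pyGetD ls j 0 - c else 0)).sum
      = (k : Int) * c - pvT ls k := by
    rw [List.map_congr_left (g := fun j => c - PySem.List.pyGetD ls j 0)
      (by intro j hj
          have := (PySem.List.mem_pyRange_one).mp hj
          simp [if_pos this.2])]
    rw [PySem.List.pyRange_one]
    simp only [Int.sub_zero, Int.toNat_natCast, List.map_map]
    have : ((List.range k).map ((fun j => c - PySem.List.pyGetD ls j 0) ∘ fun j : Nat => (0 : Int) + (j : Int)))
        = (List.range k).map (fun j : Nat => c - ls.getD j 0) := by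
      apply List.map_congr_left
      intro j _
      simp [PySem.List.pyGetD_natCast]
    rw [this, sum_map_const_sub (fun j : Nat => ls.getD j 0) c, map_getD_range ls k (by omega)]
    simp [pvT]
  have hmid : (if (k : Int) < (k : Int) then c - PySem.List.pyGetD ls (k : Int) 0
      else if (k : Int) < (k : Int) then PySem.List.pyGetD ls (k : Int) 0 - c else 0) = 0 := by
    simp
  have hhigh : ((PySem.List.pyRange ((k : Int) + 1) (ls.length : Int) 1).map (fun j =>
      if j < (k : Int) then c - PySem.List.pyGetD ls j 0
      else if (k : Int) < j then PySem.List.pyGetD ls j 0 - c else 0)).sum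
      = (pvT ls ls.length - pvT ls (k + 1)) - ((ls.length : Int) - (k + 1)) * c := by
    rw [List.map_congr_left (g := fun j => PySem.List.pyGetD ls j 0 - c)
      (by intro j hj
          have := (PySem.List.mem_pyRange_one).mp hj
          have h1 : ¬ j < (k : Int) := by omega
          have h2 : (k : Int) < j := by omega
          simp [h1, h2])]
    rw [sum_map_sub_const (fun j => PySem.List.pyGetD ls j 0) c]
    have hdrop : (PySem.List.pyRange ((k : Int) + 1) (ls.length : Int) 1).map
        (fun j => PySem.List.pyGetD ls j 0) = ls.drop (k + 1) := by
      have := PySem.List.map_pyGetD_pyRange' (xs := ls) (a := (k : Int) + 1) (d := 0) (by omega)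
      rw [this]
      have h2 : ((k : Int) + 1).toNat = k + 1 := by omega
      rw [h2]
    rw [hdrop]
    have hlen : (((PySem.List.pyRange ((k : Int) + 1) (ls.length : Int) 1).length : Int))
        = (ls.length : Int) - ((k : Int) + 1) := by
      rw [PySem.List.length_pyRange_one]; omega
    rw [hlen]
    have hsum : (ls.drop (k + 1)).sum = pvT ls ls.length - pvT ls (k + 1) := by
      have := List.take_append_drop (k + 1) ls
      have h2 : pvT ls ls.length = pvT ls (k + 1) + (ls.drop (k + 1)).sum := by
        simp only [pvT]
        rw [List.take_of_length_le (le_refl _), ← List.sum_append, List.take_append_drop]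
      omega
    rw [hsum]
  rw [hlow, hmid, hhigh, hcc]
  simp only [pvF]
  ring

theorem arrDiff2_alt_eq_map (ls : List Int) :
    arrDiff2_alt ls = (List.range ls.length).map (pvF ls) := by
  unfold arrDiff2_alt
  simp only [PySem.List.len_eq]
  rw [PySem.List.foldl_append_singleton_eq_map]
  rw [List.nil_append]
  apply List.ext_getElem
  · simp [PySem.List.length_pyRange_one]
  · intro t h1 h2
    have ht : t < ls.length := by simpa using h2
    simp only [List.getElem_map, List.getElem_range]
    rw [PySem.List.getElem_pyRange_one]
    have h0 : (0 : Int) + (t : Int) = (t : Int) := by ring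
    rw [h0]
    exact pvInnerSum ls t ht

-- ===== VERDICT (by name: the statement is the Claim_ definition above) =====
theorem arrDiff2_spec : Claim_equal_arrDiff2 := by
  intro ls _
  unfold Spec_arrDiff2
  rw [arrDiff2_eq_map, arrDiff2_alt_eq_map]
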